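-- pv_equiv track=rewrite | github.com/NIKsaurabh/speech-to-written-English | spokenToWrittenEng/myfunctions.py | currency
-- ===== SOURCE A (Python) =====
-- def currency(lst):
--     i = 0
--     while i<len(lst):
--         if (lst[i].lower() == 'dollar' or lst[i].lower() == 'dollars') and i>0:
--             lst[i] = '$'
--             if lst[i-1].isdigit():
--                 lst[i-1 : i+1] = [''.join(lst[i-1 : i+1])]
--         else:
--             i+=1
--     return lst
-- ===== SOURCE B (Python) =====
-- def currency(lst):
--     out = []
--     for tok in lst:
--         if tok.lower() in ('dollar', 'dollars') and out:
--             if out[-1].isdigit():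
--                 out[-1] = out[-1] + '$'
--             else:
--                 out.append('$')
--         else:
--             out.append(tok)
--     lst[:] = out
--     return lst
-- ===== Notes on version B (the rewrite author's own statement) =====
-- stated objective: simpler
-- what changed: Replaces A's in-place while-loop with a non-advancing index and quadratic slice-splicing by a single forward pass that builds a fresh output list (append '$' or merge into the previous digit token), written back with lst[:] = out.
import Mathlib
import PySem

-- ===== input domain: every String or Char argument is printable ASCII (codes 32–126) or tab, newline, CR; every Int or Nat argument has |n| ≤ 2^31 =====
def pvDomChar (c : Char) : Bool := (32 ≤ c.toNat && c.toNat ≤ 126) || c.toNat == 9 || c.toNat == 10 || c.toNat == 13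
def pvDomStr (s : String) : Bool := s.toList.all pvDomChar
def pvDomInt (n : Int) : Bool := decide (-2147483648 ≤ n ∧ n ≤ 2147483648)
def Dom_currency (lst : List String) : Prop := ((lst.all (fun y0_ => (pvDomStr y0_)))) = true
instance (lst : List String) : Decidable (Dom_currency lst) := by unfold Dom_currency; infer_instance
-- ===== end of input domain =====

-- B replaces A's in-place while-loop (non-advancing index, slice splicing) by one forward accumulator
-- pass (simpler); A mutates its argument in place and B mimics that with lst[:] = out — the equivalence
-- proved here is about the return value.

-- token.lower() == 'dollar' / 'dollars' (A) resp. token.lower() in ('dollar', 'dollars') (B)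
def pvIsDollar (t : String) : Bool :=
  PySem.Str.lower t == "dollar" || PySem.Str.lower t == "dollars"

-- ===== PORT A =====
-- the while-loop of A: state is the (mutated) list and the current index i.
-- The fuel argument only makes the recursion structural: one unit per loop iteration;
-- 2*lst.length+1 units are proved sufficient (pv_fuel_eq below), so behaviour is A's on every input.
def currencyLoopF : Nat → List String → Nat → List String
  | 0, lst, _ => lst
  | fuel + 1, lst, i =>
    if h : i < lst.length then
      if pvIsDollar lst[i] && decide (0 < i) then
        -- lst[i] = '$'
        let lst1 := lst.set i "$"
        if PySem.Str.strIsdigit (lst1.getD (i - 1) "") then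
          -- lst[i-1 : i+1] = [''.join(lst[i-1 : i+1])]
          currencyLoopF fuel (lst1.take (i - 1) ++
            [PySem.Str.join "" (PySem.List.slice lst1 (some ((i : Int) - 1)) (some ((i : Int) + 1)))] ++
            lst1.drop (i + 1)) i
        else
          currencyLoopF fuel lst1 i
      else
        currencyLoopF fuel lst (i + 1)
    else lst

def currency (lst : List String) : List String := currencyLoopF (2 * lst.length + 1) lst 0

-- ===== PORT B =====
-- the body of B's for-loop over the tokens, with accumulator `out`
def currencyStep (out : List String) (tok : String) : List String :=
  if pvIsDollar tok && !out.isEmpty then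
    if PySem.Str.strIsdigit (out.getLastD "") then
      out.dropLast ++ [out.getLastD "" ++ "$"]
    else
      out ++ ["$"]
  else
    out ++ [tok]

def currency_alt (lst : List String) : List String :=
  lst.foldl currencyStep []

-- ===== PRECONDITION & SPEC =====
def Spec_currency (lst : List String) (out : List String) : Prop := out = currency_alt lst
instance (lst : List String) (out : List String) : Decidable (Spec_currency lst out) := by unfold Spec_currency; infer_instance

-- ===== CLAIM (what is proved, stated in full; the proofs are below) =====
def Claim_equal_currency : Prop := ∀ (lst : List String), Dom_currency lst → Spec_currency lst (currency lst)

-- ===== LEMMAS AND PROOFS =====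

-- ''.join([a, b]) = a ++ b
theorem pv_join_pair (a b : String) : PySem.Str.join "" [a, b] = a ++ b := by
  have h : (PySem.Str.join "" [a, b]).toList = (a ++ b).toList := by
    simp [PySem.Str.toList_join, PySem.Chars.join, List.intercalate]
  exact String.toList_injective h

-- A's loop with enough fuel, started at i = out.length on out ++ rest, is B's fold over rest from accumulator out
theorem pv_fuel_eq (rest : List String) : ∀ (fuel : Nat) (out : List String),
    2 * rest.length < fuel →
    currencyLoopF fuel (out ++ rest) out.length = rest.foldl currencyStep out := by
  induction rest with
  | nil =>
    intro fuel out hf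
    obtain ⟨f, rfl⟩ : ∃ f, fuel = f + 1 := ⟨fuel - 1, by omega⟩
    rw [currencyLoopF]
    simp
  | cons tok rest ih =>
    intro fuel out hf
    obtain ⟨f, rfl⟩ : ∃ f, fuel = f + 1 := ⟨fuel - 1, by omega⟩
    have hf' : 2 * rest.length < f := by simp at hf; omega
    have hlen : out.length < (out ++ tok :: rest).length := by simp
    have hget : (out ++ tok :: rest)[out.length]'hlen = tok := by
      simp
    rw [currencyLoopF, dif_pos hlen]
    by_cases hd : pvIsDollar tok
    · rcases List.eq_nil_or_concat out with rfl | ⟨o, x, rfl⟩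
      · -- out = []: i = 0, condition false
        rw [if_neg (by simp)]
        simpa [currencyStep] using ih f [tok] hf'
      · -- out = o ++ [x]
        simp only [List.concat_eq_append] at hlen hget ⊢
        have hL : (o ++ [x]).length = o.length + 1 := by simp
        rw [if_pos (by simp [hd])]
        have hset : ((o ++ [x]) ++ tok :: rest).set (o ++ [x]).length "$"
            = o ++ x :: "$" :: rest := by
          simp [List.append_assoc, hL]
        have hgd : (o ++ x :: "$" :: rest).getD ((o ++ [x]).length - 1) "" = x := by
          rw [hL]
          simp
        by_cases hdig : PySem.Str.strIsdigit x
        all_goals simp only [PySem.Str.strIsdigit_eq] at hdig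
        · rw [if_pos (by simp [hdig])]
          have hslice : PySem.List.slice (o ++ x :: "$" :: rest)
              (some (((o ++ [x]).length : Int) - 1)) (some (((o ++ [x]).length : Int) + 1))
              = [x, "$"] := by
            have hb1 : (((o ++ [x]).length : Int) - 1) = ((o.length : Nat) : Int) := by
              simp
            have hb2 : (((o ++ [x]).length : Int) + 1) = ((o.length : Nat) : Int) + ((2 : Nat) : Int) := by
              simp; omega
            rw [hb1, hb2, PySem.List.slice_natCast_add]
            simp
          have htake : (o ++ x :: "$" :: rest).take ((o ++ [x]).length - 1) = o := by
            simp [hL]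
          have hdrop : (o ++ x :: "$" :: rest).drop ((o ++ [x]).length + 1) = rest := by
            rw [hL, show o ++ x :: "$" :: rest = (o ++ [x, "$"]) ++ rest by simp,
              show o.length + 1 + 1 = (o ++ [x, "$"]).length by simp]
            simp
          rw [hset, hslice, htake, hdrop, pv_join_pair]
          have h1 : o ++ [x ++ "$"] ++ rest = (o ++ [x ++ "$"]) ++ rest := by
            simp [List.append_assoc]
          have h2 : (o ++ [x]).length = (o ++ [x ++ "$"]).length := by simp
          rw [h1, h2, ih f _ hf']
          simp [currencyStep, hd, hdig]
        · rw [if_neg (by simp [hdig])]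
          rw [hset]
          have hfpos : 0 < f := Nat.lt_of_le_of_lt (Nat.zero_le _) hf'
          obtain ⟨f', rfl⟩ : ∃ f', f = f' + 1 := ⟨f - 1, (Nat.succ_pred_eq_of_pos hfpos).symm⟩
          have hf'' : 2 * rest.length < f' := by
            have h := hf
            simp only [List.length_cons] at h
            omega
          have hre : o ++ x :: "$" :: rest = ((o ++ [x]) ++ ["$"]) ++ rest := by
            simp
          have hlen2 : (o ++ [x]).length < (o ++ x :: "$" :: rest).length := by simp
          rw [currencyLoopF, dif_pos hlen2]
          have hget2 : (o ++ x :: "$" :: rest)[(o ++ [x]).length]'hlen2 = "$" := by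
            simp [hL]
          rw [if_neg (by simp [pvIsDollar]; exact ⟨by decide, by decide⟩)]
          have h3 : (o ++ [x]).length + 1 = ((o ++ [x]) ++ ["$"]).length := by simp
          rw [hre, h3, ih f' _ hf'']
          simp [currencyStep, hd, hdig]
    · -- not a dollar word: else branch
      rw [if_neg (by simp [hget, hd])]
      have h4 : out.length + 1 = (out ++ [tok]).length := by simp
      have h5 : out ++ tok :: rest = (out ++ [tok]) ++ rest := by simp
      rw [h5, h4, ih f _ hf']
      simp [currencyStep, hd]

-- ===== VERDICT (by name: the statement is the Claim_ definition above) =====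
theorem currency_spec : Claim_equal_currency := by
  intro lst _
  unfold Spec_currency currency currency_alt
  simpa using pv_fuel_eq lst (2 * lst.length + 1) [] (by omega)
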